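-- pv_equiv track=rewrite | github.com/joeygibson/adventofcode2023 | day14/prog.py | tilt_north_or_south
-- ===== SOURCE A (Python) =====
-- def tilt_north_or_south(the_map: list[list[str]], is_south: bool = False) -> list[list[str]]:
--     if is_south:
--         the_map.reverse()
--
--     for row_num, row in enumerate(the_map):
--         if row_num == 0:
--             # skip the first row
--             continue
--
--         for rock_num, rock in enumerate(row):
--             if rock in '#.':
--                 continue
--
--             row_to_move_to = None
--
--             row_range = range(row_num)
--             for previous_row in reversed(list(row_range)):
--                 if the_map[previous_row][rock_num] in 'O#':
--                     # we hit a rock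
--                     break
--
--                 row_to_move_to = previous_row
--
--             if row_to_move_to is not None:
--                 the_map[row_to_move_to][rock_num] = 'O'
--                 the_map[row_num][rock_num] = '.'
--
--     if is_south:
--         the_map.reverse()
--
--     return the_map
-- ===== SOURCE B (Python) =====
-- def tilt_north_or_south(the_map: list[list[str]], is_south: bool = False) -> list[list[str]]:
--     # Single row-major pass: per column, track the next free landing row, no upward rescans.
--     # Mutates the_map in place, like the original.
--     if is_south:
--         the_map.reverse()
--
--     free = {}  # column -> lowest row a rock arriving here would land on (default 0)
--     for i, row in enumerate(the_map):
--         for j, cell in enumerate(row):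
--             f = free.get(j, 0)
--             if i > 0 and cell not in '#.' and f < i:
--                 the_map[f][j] = 'O'
--                 row[j] = '.'
--                 free[j] = f + 1
--             elif cell in 'O#':
--                 free[j] = i + 1
--
--     if is_south:
--         the_map.reverse()
--
--     return the_map
-- ===== Notes on version B (the rewrite author's own statement) =====
-- stated objective: faster
-- what changed: Replaced the per-rock upward rescans (for each rock, walk up the whole column until a blocker) by a single row-major pass that keeps, per column, the next free landing row in a dictionary, so each cell is touched once; both versions mutate the_map in place identically.
import Mathlib
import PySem

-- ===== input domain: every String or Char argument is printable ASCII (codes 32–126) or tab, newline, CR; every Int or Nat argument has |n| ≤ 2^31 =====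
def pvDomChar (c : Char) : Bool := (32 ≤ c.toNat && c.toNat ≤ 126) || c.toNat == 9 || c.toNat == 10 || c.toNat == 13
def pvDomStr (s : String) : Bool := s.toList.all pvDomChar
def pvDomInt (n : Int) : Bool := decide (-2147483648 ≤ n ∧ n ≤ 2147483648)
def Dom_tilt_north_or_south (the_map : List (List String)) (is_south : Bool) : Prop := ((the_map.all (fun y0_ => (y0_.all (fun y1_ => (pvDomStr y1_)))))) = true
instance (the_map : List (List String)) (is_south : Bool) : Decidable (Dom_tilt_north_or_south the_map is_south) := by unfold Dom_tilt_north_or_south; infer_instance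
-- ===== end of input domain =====

-- B replaces A's per-rock upward rescans by one row-major pass keeping, per column, the next
-- free landing row (asymptotically faster); equivalence is about the returned value (both
-- Pythons also mutate the_map in place, in the same way).

-- ===== PORT A =====
-- the_map[i][j] with nonnegative in-range indices; out of range is an IndexError in Python,
-- excluded by Pre_ below (the "" default is never relied on inside Pre_).
def pvCell (m : List (List String)) (i j : Nat) : String := (m.getD i []).getD j ""

-- the_map[i][j] = v (in range under Pre_; List.set is a no-op out of range)
def pvSet (m : List (List String)) (i j : Nat) (v : String) : List (List String) :=
  m.set i ((m.getD i []).set j v)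

-- 'for previous_row in reversed(list(range(row_num))): if the_map[previous_row][rock_num] in "O#": break / row_to_move_to = previous_row'
def pvScanA (m : List (List String)) (j : Nat) : List Nat → Option Nat → Option Nat
  | [], r => r
  | p :: rest, r =>
    if PySem.Str.isIn (pvCell m p j) "O#" then r
    else pvScanA m j rest (some p)

-- the body of A's inner 'for rock_num, rock in enumerate(row)' loop at cell (i, j)
def pvCellA (m : List (List String)) (i j : Nat) : List (List String) :=
  let rock := pvCell m i j
  if PySem.Str.isIn rock "#." then m
  else
    match pvScanA m j (List.range i).reverse none with
    | none => m
    | some r => pvSet (pvSet m r j "O") i j "."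

-- one iteration of A's outer loop (row i, i ≠ 0)
def pvRowA (m : List (List String)) (i : Nat) : List (List String) :=
  (List.range ((m.getD i []).length)).foldl (fun acc j => pvCellA acc i j) m

def tilt_north_or_south (the_map : List (List String)) (is_south : Bool) : List (List String) :=
  let m0 := if is_south then the_map.reverse else the_map
  let m1 := (List.range m0.length).foldl (fun acc i => if i = 0 then acc else pvRowA acc i) m0
  if is_south then m1.reverse else m1

-- ===== PORT B =====
-- the body of B's inner loop at cell (i, j): state is (map, free) with free : dict col → next free row
def pvStepB (st : List (List String) × PySem.Dict Nat Nat) (i j : Nat) :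
    List (List String) × PySem.Dict Nat Nat :=
  let cell := pvCell st.1 i j
  let f := st.2.getD j 0
  if 0 < i ∧ PySem.Str.isIn cell "#." = false ∧ f < i then
    (pvSet (pvSet st.1 f j "O") i j ".", st.2.insert j (f + 1))
  else if PySem.Str.isIn cell "O#" then (st.1, st.2.insert j (i + 1))
  else st

def pvRowB (st : List (List String) × PySem.Dict Nat Nat) (i : Nat) :
    List (List String) × PySem.Dict Nat Nat :=
  (List.range ((st.1.getD i []).length)).foldl (fun acc j => pvStepB acc i j) st

def tilt_north_or_south_alt (the_map : List (List String)) (is_south : Bool) : List (List String) :=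
  let m0 := if is_south then the_map.reverse else the_map
  let m1 := ((List.range m0.length).foldl (fun acc i => pvRowB acc i) (m0, PySem.Dict.empty)).1
  if is_south then m1.reverse else m1

-- ===== PRECONDITION & SPEC =====
-- Pre_ excludes ragged maps in which some movable cell (one not contained in '#.') lies below a
-- row that is too short at its column: on such maps A's upward scan usually hits the missing cell
-- and raises IndexError (A still returns on the few where a blocker interrupts the scan first;
-- those are excluded too, for simplicity of the condition).
def Pre_tilt_north_or_south (the_map : List (List String)) (is_south : Bool) : Prop :=
  ((if is_south then the_map.reverse else the_map) |> fun eff =>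
    (List.range eff.length).all (fun i =>
      (List.range ((eff.getD i []).length)).all (fun j =>
        PySem.Str.isIn ((eff.getD i []).getD j "") "#." ||
        (List.range i).all (fun k => decide (j < (eff.getD k []).length))))) = true
instance (the_map : List (List String)) (is_south : Bool) : Decidable (Pre_tilt_north_or_south the_map is_south) := by unfold Pre_tilt_north_or_south; infer_instance

def pvWitness_tilt_north_or_south : List (List String) × Bool :=
  ([["O", "."], [".", "#"], ["O", "O"]], false)

def Spec_tilt_north_or_south (the_map : List (List String)) (is_south : Bool) (out : List (List String)) : Prop := out = tilt_north_or_south_alt the_map is_south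
instance (the_map : List (List String)) (is_south : Bool) (out : List (List String)) : Decidable (Spec_tilt_north_or_south the_map is_south out) := by unfold Spec_tilt_north_or_south; infer_instance

-- ===== CLAIM (what is proved, stated in full; the proofs are below) =====
def Claim_equal_tilt_north_or_south : Prop := ∀ (the_map : List (List String)) (is_south : Bool), Dom_tilt_north_or_south the_map is_south → Pre_tilt_north_or_south the_map is_south → Spec_tilt_north_or_south the_map is_south (tilt_north_or_south the_map is_south)

-- ===== LEMMAS AND PROOFS =====

-- cell (k, j) blocks a rock falling in column j
def pvBlk (m : List (List String)) (j k : Nat) : Bool := PySem.Str.isIn (pvCell m k j) "O#"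

-- lowest row r such that rows r..k-1 of column j are all non-blocking
def pvG (m : List (List String)) (j : Nat) : Nat → Nat
  | 0 => 0
  | k + 1 => if pvBlk m j k then k + 1 else pvG m j k

-- all rows below row k are long enough at column j
def pvFull (m : List (List String)) (k j : Nat) : Prop :=
  ∀ r, r < k → j < (m.getD r []).length

-- semantic form of Pre_ for the effective (possibly reversed) map; preserved by the passes
def pvPreP (m : List (List String)) : Prop :=
  ∀ i j, j < (m.getD i []).length → PySem.Str.isIn (pvCell m i j) "#." = false → pvFull m i j

-- the dictionary invariant: before processing cell (i, j), the stored next free row of every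
-- column c is pvG of the current map (rows up to i+1 for the already-processed columns of row i,
-- up to i for the rest), whenever the column is long enough for the value to matter
def pvInv (m : List (List String)) (nf : PySem.Dict Nat Nat) (i j : Nat) : Prop :=
  ∀ c, (c < j → pvFull m (i + 1) c → nf.getD c 0 = pvG m c (i + 1)) ∧
       (¬ c < j → pvFull m i c → nf.getD c 0 = pvG m c i)

theorem pvG_le (m : List (List String)) (j : Nat) : ∀ k, pvG m j k ≤ k := by
  intro k
  induction k with
  | zero => simp [pvG]
  | succ n ih => simp only [pvG]; split <;> omega

theorem pvScanA_eq (m : List (List String)) (j : Nat) :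
    ∀ (k : Nat) (acc : Option Nat),
      pvScanA m j (List.range k).reverse acc =
        (if pvG m j k = k then acc else some (pvG m j k)) := by
  intro k
  induction k with
  | zero => intro acc; simp [pvScanA, pvG]
  | succ n ih =>
    intro acc
    have hrev : (List.range (n + 1)).reverse = n :: (List.range n).reverse := by
      simp [List.range_succ]
    rw [hrev]
    have hS : pvScanA m j (n :: (List.range n).reverse) acc =
        if PySem.Str.isIn (pvCell m n j) "O#" = true then acc
        else pvScanA m j (List.range n).reverse (some n) := rfl
    have hG : pvG m j (n + 1) =
        if PySem.Str.isIn (pvCell m n j) "O#" = true then n + 1 else pvG m j n := rfl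
    rw [hS, hG]
    by_cases hb : PySem.Str.isIn (pvCell m n j) "O#" = true
    · rw [if_pos hb, if_pos hb, if_pos rfl]
    · rw [if_neg hb, if_neg hb, ih]
      have hle := pvG_le m j n
      by_cases hg : pvG m j n = n
      · rw [if_pos hg, hg, if_neg (by omega)]
      · rw [if_neg hg, if_neg (show ¬ pvG m j n = n + 1 by omega)]

-- rows pvG..k-1 of column j are non-blocking
theorem pvG_nonblk (m : List (List String)) (j : Nat) :
    ∀ k r, pvG m j k ≤ r → r < k → pvBlk m j r = false := by
  intro k
  induction k with
  | zero => intro r _ h; omega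
  | succ n ih =>
    intro r h1 h2
    simp only [pvG] at h1
    by_cases hb : pvBlk m j n = true
    · rw [if_pos hb] at h1; omega
    · rw [if_neg hb] at h1
      by_cases hr : r = n
      · subst hr; simpa using hb
      · exact ih r h1 (by omega)

-- computing pvG when row g is blocking and rows g+1..k-1 are not
theorem pvG_eq_of (m : List (List String)) (j : Nat) (g : Nat) (hg : pvBlk m j g = true) :
    ∀ k, g < k → (∀ r, g < r → r < k → pvBlk m j r = false) → pvG m j k = g + 1 := by
  intro k
  induction k with
  | zero => intro h; omega
  | succ n ih =>
    intro h1 h2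
    simp only [pvG]
    by_cases hn : g = n
    · subst hn; simp [hg]
    · have hnb : pvBlk m j n = false := h2 n (by omega) (by omega)
      rw [if_neg (by simp [hnb])]
      exact ih (by omega) (fun r hr1 hr2 => h2 r hr1 (by omega))

-- the row of pvSet at any index
theorem pvRow_set (m : List (List String)) (i j : Nat) (v : String) (k : Nat) :
    (pvSet m i j v).getD k [] =
      if k = i ∧ i < m.length then (m.getD i []).set j v else m.getD k [] := by
  simp only [pvSet, List.getD_eq_getElem?_getD]
  by_cases hk : k = i
  · subst hk
    by_cases hi : k < m.length
    · rw [List.getElem?_set_self hi]; simp [hi]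
    · rw [List.getElem?_eq_none (by simp only [List.length_set]; omega),
        List.getElem?_eq_none (by omega)]
      simp [hi]
  · rw [List.getElem?_set_ne (by omega)]; simp [hk]

theorem pvSet_len (m : List (List String)) (i j : Nat) (v : String) :
    (pvSet m i j v).length = m.length := by simp [pvSet]

theorem pvSet_row_len (m : List (List String)) (i j : Nat) (v : String) (t : Nat) :
    ((pvSet m i j v).getD t []).length = (m.getD t []).length := by
  rw [pvRow_set]
  split
  · next h => rw [List.length_set, h.1]
  · rfl

theorem pvCell_set_ne (m : List (List String)) (i j : Nat) (v : String) (k c : Nat)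
    (hc : c ≠ j) : pvCell (pvSet m i j v) k c = pvCell m k c := by
  simp only [pvCell]
  rw [pvRow_set]
  split
  · next h => rw [h.1, List.getD_eq_getElem?_getD, List.getElem?_set_ne (by omega),
      ← List.getD_eq_getElem?_getD]
  · rfl

theorem pvCell_set_row_ne (m : List (List String)) (i j : Nat) (v : String) (k c : Nat)
    (hk : k ≠ i) : pvCell (pvSet m i j v) k c = pvCell m k c := by
  simp only [pvCell]
  rw [pvRow_set, if_neg (by tauto)]

theorem pvCell_set_self (m : List (List String)) (i j : Nat) (v : String)
    (hi : i < m.length) (hj : j < (m.getD i []).length) :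
    pvCell (pvSet m i j v) i j = v := by
  simp only [pvCell]
  rw [pvRow_set, if_pos ⟨rfl, hi⟩, List.getD_eq_getElem?_getD,
    List.getElem?_set_self (by omega)]
  rfl

theorem pvG_congr (m m' : List (List String)) (c : Nat)
    (h : ∀ r, pvCell m' r c = pvCell m r c) : ∀ k, pvG m' c k = pvG m c k := by
  intro k
  induction k with
  | zero => rfl
  | succ n ih => simp only [pvG, pvBlk, h, ih]; split <;> rfl

theorem pvFull_congr (m m' : List (List String)) (c : Nat)
    (h : ∀ t, (m'.getD t []).length = (m.getD t []).length) (k : Nat) :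
    pvFull m' k c ↔ pvFull m k c := by
  unfold pvFull
  constructor <;> intro hf r hr
  · rw [← h r]; exact hf r hr
  · rw [h r]; exact hf r hr

-- the elif branch of B's step (no move) preserves the invariant
theorem pvElif_inv (m : List (List String)) (nf : PySem.Dict Nat Nat) (i j : Nat)
    (hinv : pvInv m nf i j) :
    pvInv m (if PySem.Str.isIn (pvCell m i j) "O#" = true then nf.insert j (i + 1) else nf)
      i (j + 1) := by
  intro c
  by_cases hcj : c = j
  · subst hcj
    refine ⟨fun _ hfull => ?_, fun h => absurd (Nat.lt_succ_self c) h⟩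
    have hfi : pvFull m i c := fun r hr => hfull r (by omega)
    have hv := (hinv c).2 (lt_irrefl c) hfi
    have hG : pvG m c (i + 1) =
        if PySem.Str.isIn (pvCell m i c) "O#" = true then i + 1 else pvG m c i := rfl
    by_cases hb : PySem.Str.isIn (pvCell m i c) "O#" = true
    · rw [if_pos hb, PySem.Dict.getD_insert_self, hG, if_pos hb]
    · rw [if_neg hb, hG, if_neg hb]; exact hv
  · have hget : (if PySem.Str.isIn (pvCell m i j) "O#" = true
        then nf.insert j (i + 1) else nf).getD c 0 = nf.getD c 0 := by
      split
      · exact PySem.Dict.getD_insert_of_ne nf _ _ hcj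
      · rfl
    refine ⟨fun hc hfull => ?_, fun hc hfull => ?_⟩
    · rw [hget]; exact (hinv c).1 (by omega) hfull
    · rw [hget]; exact (hinv c).2 (by omega) hfull

-- one cell: B's step computes A's cell action and maintains the invariant
theorem pvCell_sim (m : List (List String)) (nf : PySem.Dict Nat Nat) (i j : Nat)
    (hLen : j < (m.getD i []).length) (hpre : pvPreP m) (hinv : pvInv m nf i j) :
    (pvStepB (m, nf) i j).1 = pvCellA m i j ∧
    pvInv (pvStepB (m, nf) i j).1 (pvStepB (m, nf) i j).2 i (j + 1) ∧
    pvPreP (pvStepB (m, nf) i j).1 ∧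
    (∀ t, (((pvStepB (m, nf) i j).1).getD t []).length = (m.getD t []).length) ∧
    ((pvStepB (m, nf) i j).1).length = m.length := by
  have him : i < m.length := by
    by_contra h
    rw [List.getD_eq_getElem?_getD, List.getElem?_eq_none (by omega)] at hLen
    simp at hLen
  have hstep : pvStepB (m, nf) i j =
      if 0 < i ∧ PySem.Str.isIn (pvCell m i j) "#." = false ∧ nf.getD j 0 < i then
        (pvSet (pvSet m (nf.getD j 0) j "O") i j ".", nf.insert j (nf.getD j 0 + 1))
      else if PySem.Str.isIn (pvCell m i j) "O#" = true then (m, nf.insert j (i + 1))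
      else (m, nf) := rfl
  have hcellA : pvCellA m i j =
      if PySem.Str.isIn (pvCell m i j) "#." = true then m
      else
        match pvScanA m j (List.range i).reverse none with
        | none => m
        | some r => pvSet (pvSet m r j "O") i j "." := rfl
  by_cases hmov : PySem.Str.isIn (pvCell m i j) "#." = true
  · -- cell skipped by A; B takes the elif branch
    have hAm : pvCellA m i j = m := by rw [hcellA, if_pos hmov]
    have hB : pvStepB (m, nf) i j =
        (m, if PySem.Str.isIn (pvCell m i j) "O#" = true then nf.insert j (i + 1) else nf) := by
      rw [hstep, if_neg (by rintro ⟨_, h2, _⟩; rw [hmov] at h2; cases h2)]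
      split <;> rfl
    rw [hB, hAm]
    exact ⟨rfl, pvElif_inv m nf i j hinv, hpre, fun _ => rfl, rfl⟩
  · have hmov' : PySem.Str.isIn (pvCell m i j) "#." = false := by
      simpa using hmov
    have hfull_i : pvFull m i j := hpre i j hLen hmov'
    have hf : nf.getD j 0 = pvG m j i := (hinv j).2 (lt_irrefl j) hfull_i
    have hgle := pvG_le m j i
    by_cases hgi : pvG m j i = i
    · -- no free slot: A's scan returns none; B takes the elif branch
      have hAm : pvCellA m i j = m := by
        rw [hcellA, if_neg (by rw [hmov']; simp), pvScanA_eq, if_pos hgi]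
      have hB : pvStepB (m, nf) i j =
          (m, if PySem.Str.isIn (pvCell m i j) "O#" = true then nf.insert j (i + 1) else nf) := by
        rw [hstep, if_neg (by rintro ⟨_, _, h3⟩; rw [hf, hgi] at h3; omega)]
        split <;> rfl
      rw [hB, hAm]
      exact ⟨rfl, pvElif_inv m nf i j hinv, hpre, fun _ => rfl, rfl⟩
    · -- the rock moves to row g := pvG m j i < i
      set g := pvG m j i with hgdef
      have hglt : g < i := by omega
      have hipos : 0 < i := by omega
      have hgm : g < m.length := by omega
      have hjg : j < (m.getD g []).length := hfull_i g hglt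
      have hAm : pvCellA m i j = pvSet (pvSet m g j "O") i j "." := by
        rw [hcellA, if_neg (by rw [hmov']; simp), pvScanA_eq, if_neg hgi]
      have hB : pvStepB (m, nf) i j =
          (pvSet (pvSet m g j "O") i j ".", nf.insert j (g + 1)) := by
        rw [hstep, if_pos ⟨hipos, hmov', by rw [hf]; exact hglt⟩, hf]
      set M := pvSet (pvSet m g j "O") i j "." with hMdef
      -- geometry of M
      have hrowlen : ∀ t, (M.getD t []).length = (m.getD t []).length := by
        intro t; rw [hMdef, pvSet_row_len, pvSet_row_len]
      have hMlen : M.length = m.length := by rw [hMdef, pvSet_len, pvSet_len]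
      have hcell_ne : ∀ k c, c ≠ j → pvCell M k c = pvCell m k c := by
        intro k c hc; rw [hMdef, pvCell_set_ne _ _ _ _ _ _ hc, pvCell_set_ne _ _ _ _ _ _ hc]
      have hcell_i : pvCell M i j = "." := by
        rw [hMdef]
        exact pvCell_set_self _ _ _ _ (by rw [pvSet_len]; omega) (by rw [pvSet_row_len]; omega)
      have hcell_g : pvCell M g j = "O" := by
        rw [hMdef, pvCell_set_row_ne _ _ _ _ _ _ (by omega)]
        exact pvCell_set_self _ _ _ _ hgm hjg
      have hcell_other : ∀ k, k ≠ i → k ≠ g → pvCell M k j = pvCell m k j := by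
        intro k hki hkg
        rw [hMdef, pvCell_set_row_ne _ _ _ _ _ _ hki, pvCell_set_row_ne _ _ _ _ _ _ hkg]
      -- pvG of column j in M up to i+1 is g+1
      have hblkO : pvBlk M j g = true := by
        simp only [pvBlk, hcell_g]; decide
      have hnb : ∀ r, g < r → r < i → pvBlk M j r = false := by
        intro r h1 h2
        simp only [pvBlk, hcell_other r (by omega) (by omega)]
        exact pvG_nonblk m j i r (by omega) h2
      have hGi : pvG M j i = g + 1 := pvG_eq_of M j g hblkO i hglt hnb
      have hGsucc : pvG M j (i + 1) = g + 1 := by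
        have hG : pvG M j (i + 1) = if pvBlk M j i then i + 1 else pvG M j i := rfl
        rw [hG, if_neg (by simp only [pvBlk, hcell_i]; decide), hGi]
      refine ⟨by rw [hB, hAm], ?_, ?_, by rw [hB]; exact hrowlen, by rw [hB]; exact hMlen⟩
      · -- invariant
        rw [hB]
        show pvInv M (nf.insert j (g + 1)) i (j + 1)
        intro c
        by_cases hcj : c = j
        · subst hcj
          exact ⟨fun _ _ => by rw [PySem.Dict.getD_insert_self, hGsucc],
                 fun h => absurd (Nat.lt_succ_self c) h⟩
        · have hcells : ∀ r, pvCell M r c = pvCell m r c := fun r => hcell_ne r c hcj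
          have hGc := pvG_congr m M c hcells
          have hFc := pvFull_congr m M c hrowlen
          have hget : (nf.insert j (g + 1)).getD c 0 = nf.getD c 0 :=
            PySem.Dict.getD_insert_of_ne nf _ _ hcj
          refine ⟨fun hc hfull => ?_, fun hc hfull => ?_⟩
          · rw [hget, hGc]; exact (hinv c).1 (by omega) ((hFc _).mp hfull)
          · rw [hget, hGc]; exact (hinv c).2 (by omega) ((hFc _).mp hfull)
      · -- pvPreP is preserved
        rw [hB]
        show pvPreP M
        intro k c hkc hmv
        rw [hrowlen] at hkc
        have hfull_of : pvFull m k c → pvFull M k c := fun h =>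
          (pvFull_congr m M c hrowlen k).mpr h
        by_cases hcj : c = j
        · subst hcj
          by_cases hki : k = i
          · subst hki
            rw [hcell_i] at hmv
            exact absurd hmv (by decide)
          · by_cases hkg : k = g
            · subst hkg
              exact hfull_of (fun r hr => hfull_i r (by omega))
            · rw [hcell_other k hki hkg] at hmv
              exact hfull_of (hpre k c hkc hmv)
        · rw [hcell_ne k c hcj] at hmv
          exact hfull_of (hpre k c hkc hmv)

-- A does nothing on row 0 (the scan range is empty)
theorem pvCellA_zero (m : List (List String)) (j : Nat) : pvCellA m 0 j = m := by
  have h0 : pvCellA m 0 j =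
      if PySem.Str.isIn (pvCell m 0 j) "#." = true then m
      else
        match pvScanA m j (List.range 0).reverse none with
        | none => m
        | some r => pvSet (pvSet m r j "O") 0 j "." := rfl
  have hsc : pvScanA m j (List.range 0).reverse none = none := rfl
  rw [h0, hsc]
  split <;> rfl

theorem pvFoldA_zero (l : List Nat) : ∀ m : List (List String),
    l.foldl (fun acc j => pvCellA acc 0 j) m = m := by
  induction l with
  | nil => intro m; rfl
  | cons a l ih =>
    intro m
    simp only [List.foldl_cons]
    rw [pvCellA_zero]
    exact ih m

-- one row: B's fold over the row computes A's fold over the same cells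
theorem pvRow_sim (i : Nat) : ∀ (k j : Nat) (m : List (List String)) (nf : PySem.Dict Nat Nat),
    j + k ≤ (m.getD i []).length → pvPreP m → pvInv m nf i j →
    ((List.range' j k).foldl (fun acc c => pvStepB acc i c) (m, nf)).1 =
      (List.range' j k).foldl (fun acc c => pvCellA acc i c) m ∧
    pvInv ((List.range' j k).foldl (fun acc c => pvStepB acc i c) (m, nf)).1
      ((List.range' j k).foldl (fun acc c => pvStepB acc i c) (m, nf)).2 i (j + k) ∧
    pvPreP ((List.range' j k).foldl (fun acc c => pvStepB acc i c) (m, nf)).1 ∧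
    (∀ t, ((((List.range' j k).foldl (fun acc c => pvStepB acc i c) (m, nf)).1).getD t []).length
        = (m.getD t []).length) ∧
    (((List.range' j k).foldl (fun acc c => pvStepB acc i c) (m, nf)).1).length = m.length := by
  intro k
  induction k with
  | zero =>
    intro j m nf _ hpre hinv
    exact ⟨rfl, hinv, hpre, fun _ => rfl, rfl⟩
  | succ k ih =>
    intro j m nf hjk hpre hinv
    rw [List.range'_succ]
    simp only [List.foldl_cons]
    have hj : j < (m.getD i []).length := by omega
    obtain ⟨h1, h2, h3, h4, h5⟩ := pvCell_sim m nf i j hj hpre hinv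
    have hpair : pvStepB (m, nf) i j = (pvCellA m i j, (pvStepB (m, nf) i j).2) := by
      rw [← h1]
    rw [h1] at h2 h3 h4 h5
    rw [hpair]
    have hjk1 : (j + 1) + k ≤ ((pvCellA m i j).getD i []).length := by rw [h4]; omega
    obtain ⟨g1, g2, g3, g4, g5⟩ := ih (j + 1) (pvCellA m i j) ((pvStepB (m, nf) i j).2)
      hjk1 h3 h2
    have hadd : j + 1 + k = j + (k + 1) := by omega
    rw [hadd] at g2
    exact ⟨g1, g2, g3, fun t => (g4 t).trans (h4 t), g5.trans h5⟩

-- the end-of-row invariant is the start-of-next-row invariant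
theorem pvInv_next_row (m : List (List String)) (nf : PySem.Dict Nat Nat) (i L : Nat)
    (hL : (m.getD i []).length ≤ L) (hinv : pvInv m nf i L) : pvInv m nf (i + 1) 0 := by
  intro c
  refine ⟨fun hc => absurd hc (by omega), fun _ hfull => ?_⟩
  have hrow : c < (m.getD i []).length := hfull i (Nat.lt_succ_self i)
  exact (hinv c).1 (by omega) hfull

theorem pvInv_init (m : List (List String)) : pvInv m PySem.Dict.empty 0 0 := by
  intro c
  refine ⟨fun hc => absurd hc (by omega), fun _ _ => ?_⟩
  rw [PySem.Dict.getD_empty]; rfl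

-- the outer loops agree row by row
theorem pvCore_sim : ∀ (k i : Nat) (m : List (List String)) (nf : PySem.Dict Nat Nat),
    pvPreP m → pvInv m nf i 0 →
    ((List.range' i k).foldl (fun acc r => pvRowB acc r) (m, nf)).1 =
      (List.range' i k).foldl (fun acc r => if r = 0 then acc else pvRowA acc r) m := by
  intro k
  induction k with
  | zero => intro i m nf _ _; rfl
  | succ k ih =>
    intro i m nf hpre hinv
    rw [List.range'_succ]
    simp only [List.foldl_cons]
    have hrowB : pvRowB (m, nf) i =
        (List.range' 0 ((m.getD i []).length)).foldl (fun acc j => pvStepB acc i j) (m, nf) := by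
      have h : pvRowB (m, nf) i =
          (List.range ((m.getD i []).length)).foldl (fun acc j => pvStepB acc i j) (m, nf) := rfl
      rw [h, List.range_eq_range']
    obtain ⟨hB1, hInv, hPre, hLen, _⟩ :=
      pvRow_sim i ((m.getD i []).length) 0 m nf (by omega) hpre hinv
    have hA1 : ((List.range' 0 ((m.getD i []).length)).foldl
        (fun acc j => pvStepB acc i j) (m, nf)).1 = (if i = 0 then m else pvRowA m i) := by
      by_cases hi0 : i = 0
      · subst hi0
        rw [if_pos rfl, hB1, pvFoldA_zero]
      · rw [if_neg hi0, hB1]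
        have h : pvRowA m i =
            (List.range ((m.getD i []).length)).foldl (fun acc j => pvCellA acc i j) m := rfl
        rw [h, List.range_eq_range']
    have hInv' : pvInv ((List.range' 0 ((m.getD i []).length)).foldl
        (fun acc j => pvStepB acc i j) (m, nf)).1
        ((List.range' 0 ((m.getD i []).length)).foldl
        (fun acc j => pvStepB acc i j) (m, nf)).2 (i + 1) 0 := by
      apply pvInv_next_row _ _ i ((m.getD i []).length) (by rw [hLen]) (by simpa using hInv)
    have := ih (i + 1) ((List.range' 0 ((m.getD i []).length)).foldl
        (fun acc j => pvStepB acc i j) (m, nf)).1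
        ((List.range' 0 ((m.getD i []).length)).foldl
        (fun acc j => pvStepB acc i j) (m, nf)).2 hPre hInv'
    rw [hrowB, ← hA1]
    exact this

-- Pre_ gives the semantic precondition for the effective map
theorem pvPre_to_PreP (tm : List (List String)) (s : Bool)
    (h : Pre_tilt_north_or_south tm s) : pvPreP (if s then tm.reverse else tm) := by
  unfold Pre_tilt_north_or_south at h
  have h' : (List.range (if s then tm.reverse else tm).length).all (fun i =>
      (List.range (((if s then tm.reverse else tm).getD i []).length)).all (fun j =>
        PySem.Str.isIn (((if s then tm.reverse else tm).getD i []).getD j "") "#." ||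
        (List.range i).all (fun k =>
          decide (j < ((if s then tm.reverse else tm).getD k []).length)))) = true := h
  intro i j hj hmv r hr
  have hi : i < (if s then tm.reverse else tm).length := by
    by_contra hni
    rw [List.getD_eq_getElem?_getD, List.getElem?_eq_none (by omega)] at hj
    simp at hj
  simp only [List.all_eq_true, List.mem_range] at h'
  have hor := h' i hi j hj
  rcases Bool.or_eq_true_iff.mp hor with hl | hr'
  · have : pvCell (if s then tm.reverse else tm) i j =
        ((if s then tm.reverse else tm).getD i []).getD j "" := rfl
    rw [this, hl] at hmv
    cases hmv
  · simp only [List.all_eq_true, List.mem_range, decide_eq_true_eq] at hr'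
    exact hr' r hr

-- ===== VERDICT (by name: the statement is the Claim_ definition above) =====
theorem tilt_north_or_south_spec : Claim_equal_tilt_north_or_south := by
  unfold Claim_equal_tilt_north_or_south
  intro tm s _ hpre
  unfold Spec_tilt_north_or_south
  have hP := pvPre_to_PreP tm s hpre
  have hcore := pvCore_sim (if s then tm.reverse else tm).length 0
    (if s then tm.reverse else tm) PySem.Dict.empty hP (pvInv_init _)
  simp only [tilt_north_or_south, tilt_north_or_south_alt, List.range_eq_range']
  rw [hcore]
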